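-- pv_equiv track=rewrite | github.com/massudavide/vertex | maskedShingles.py | create_masked_shingles
-- ===== SOURCE A (Python) =====
-- def create_masked_shingles(url_hash_list):
--     masked_shigle_dict = {}
--     for col in url_hash_list:
--         col_list = col[1]
--         if tuple(col_list) in masked_shigle_dict:
--             masked_shigle_dict[tuple(col_list)] += 1
--         else:
--             masked_shigle_dict[tuple(col_list)] = 1
--         for i in range(len(col_list)):
--             col_list1 = list(col_list)
--             col_list1[i] = '*'
--             if tuple(col_list1) in masked_shigle_dict:
--                 masked_shigle_dict[tuple(col_list1)] += 1
--             else: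
--                 masked_shigle_dict[tuple(col_list1)] = 1
--             for j in range(i+1, len(col_list)):
--                 col_list2 = list(col_list1)
--                 col_list2[j] = '*'
--                 if tuple(col_list2) in masked_shigle_dict:
--                     masked_shigle_dict[tuple(col_list2)] += 1
--                 else:
--                     masked_shigle_dict[tuple(col_list2)] = 1
--     return masked_shigle_dict
-- ===== SOURCE B (Python) =====
-- def create_masked_shingles(url_hash_list):
--     # One recursive enumerator produces, for each column, every shingle with at
--     # most `budget` positions masked (in lexicographic mask order), and a single
--     # counting loop tallies them; replaces A's three hand-inlined loop levels.
--     def masked(t, start, budget):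
--         res = [t]
--         if budget > 0:
--             for i in range(start, len(t)):
--                 res.extend(masked(t[:i] + ('*',) + t[i + 1:], i + 1, budget - 1))
--         return res
--
--     counts = {}
--     for _, col in url_hash_list:
--         for s in masked(tuple(col), 0, 2):
--             counts[s] = counts.get(s, 0) + 1
--     return counts
-- ===== Notes on version B (the rewrite author's own statement) =====
-- stated objective: simpler
-- what changed: Replaces A's three hand-inlined masking levels (base tuple, single nested loop, doubly nested loop, each with its own in-dict test) by one budget-parametric recursive enumerator of up-to-2-masked shingles plus a single counting loop using dict.get.
import Mathlib
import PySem

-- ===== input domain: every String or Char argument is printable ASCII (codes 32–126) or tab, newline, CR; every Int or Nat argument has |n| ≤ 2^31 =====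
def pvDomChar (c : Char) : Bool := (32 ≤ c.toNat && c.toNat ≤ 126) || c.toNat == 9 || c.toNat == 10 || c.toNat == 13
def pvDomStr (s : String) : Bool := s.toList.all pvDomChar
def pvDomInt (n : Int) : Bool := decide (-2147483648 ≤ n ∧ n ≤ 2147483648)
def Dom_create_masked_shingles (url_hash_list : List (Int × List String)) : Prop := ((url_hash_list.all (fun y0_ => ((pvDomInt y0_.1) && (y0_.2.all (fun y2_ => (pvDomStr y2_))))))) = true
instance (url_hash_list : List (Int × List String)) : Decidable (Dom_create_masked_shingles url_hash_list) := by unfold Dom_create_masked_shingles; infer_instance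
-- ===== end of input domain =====

-- B replaces A's three hand-inlined masking loop levels by one recursive enumerator of
-- up-to-`budget`-masked shingles plus a single counting loop (objective: simpler).


-- ===== PORT A =====
-- Literal transliteration: dict → PySem.Dict; the two index assignments use pySetD
-- (indices come from range(len), always in range, so pySetD is exact there).
def create_masked_shingles (url_hash_list : List (Int × List String)) : List (List String × Int) :=
  (url_hash_list.foldl (fun d col =>
    let col_list := col.2
    let d :=
      if d.contains col_list then d.insert col_list (d.getD col_list 0 + 1)
      else d.insert col_list 1
    (PySem.List.pyRange 0 (col_list.length : Int) 1).foldl (fun d i =>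
      let col_list1 := PySem.List.pySetD col_list i "*"
      let d :=
        if d.contains col_list1 then d.insert col_list1 (d.getD col_list1 0 + 1)
        else d.insert col_list1 1
      (PySem.List.pyRange (i + 1) (col_list.length : Int) 1).foldl (fun d j =>
        let col_list2 := PySem.List.pySetD col_list1 j "*"
        if d.contains col_list2 then d.insert col_list2 (d.getD col_list2 0 + 1)
        else d.insert col_list2 1) d) d)
    PySem.Dict.empty).items

-- ===== PORT B =====
-- `t[:i] + ('*',) + t[i+1:]` is exactly take i ++ "*" :: drop (i+1) (non-negative slice bounds).
def pvMasked (t : List String) (start : Nat) (budget : Nat) : List (List String) :=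
  match budget with
  | 0 => [t]
  | b + 1 =>
    (List.range' start (t.length - start)).foldl
      (fun res i => res ++ pvMasked (t.take i ++ "*" :: t.drop (i + 1)) (i + 1) b) [t]

def create_masked_shingles_alt (url_hash_list : List (Int × List String)) : List (List String × Int) :=
  (url_hash_list.foldl (fun counts col =>
    (pvMasked col.2 0 2).foldl (fun d s => d.insert s (d.getD s 0 + 1)) counts)
    PySem.Dict.empty).items

-- ===== PRECONDITION & SPEC =====
def Spec_create_masked_shingles (url_hash_list : List (Int × List String)) (out : List (List String × Int)) : Prop := out = create_masked_shingles_alt url_hash_list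
instance (url_hash_list : List (Int × List String)) (out : List (List String × Int)) : Decidable (Spec_create_masked_shingles url_hash_list out) := by unfold Spec_create_masked_shingles; infer_instance

-- ===== CLAIM (what is proved, stated in full; the proofs are below) =====
def Claim_equal_create_masked_shingles : Prop := ∀ (url_hash_list : List (Int × List String)), Dom_create_masked_shingles url_hash_list → Spec_create_masked_shingles url_hash_list (create_masked_shingles url_hash_list)

-- ===== LEMMAS AND PROOFS =====

-- A's "if key in d: d[k] += 1 else: d[k] = 1" is the single bump d.insert s (d.getD s 0 + 1).
theorem pv_bump_eq (d : PySem.Dict (List String) Int) (s : List String) :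
    (if d.contains s then d.insert s (d.getD s 0 + 1) else d.insert s 1) =
      d.insert s (d.getD s 0 + 1) := by
  by_cases h : d.contains s
  · simp [h]
  · simp [h, PySem.Dict.getD_of_not_contains d 0 (by simpa using h)]

-- folding an inner fold over g i equals one fold over the flattened list
theorem pv_foldl_foldl_eq_flatMap {α β δ : Type} (l : List α) (g : α → List β)
    (f : δ → β → δ) (d : δ) :
    l.foldl (fun d i => (g i).foldl f d) d = (l.flatMap g).foldl f d := by
  induction l generalizing d with
  | nil => rfl
  | cons a l ih => simp [List.flatMap_cons, List.foldl_append, ih]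

theorem pvMasked_succ (t : List String) (s b : Nat) :
    pvMasked t s (b + 1) =
      t :: (List.range' s (t.length - s)).flatMap
        (fun i => pvMasked (t.take i ++ "*" :: t.drop (i + 1)) (i + 1) b) := by
  rw [pvMasked, PySem.List.foldl_append_eq_flatMap]
  rfl

theorem pv_mask_length (t : List String) (i : Nat) (h : i < t.length) :
    (t.take i ++ "*" :: t.drop (i + 1)).length = t.length := by
  simp [List.length_take, List.length_drop]
  omega

-- A's Int range fold rewritten as a Nat range' fold, with pySetD turned into take/cons/drop
theorem pv_set_eq (t : List String) (i : Nat) (h : i < t.length) :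
    PySem.List.pySetD t (i : Int) "*" = t.take i ++ "*" :: t.drop (i + 1) := by
  rw [PySem.List.pySetD_natCast, List.set_eq_take_append_cons_drop]
  simp [h]

theorem pv_pyRange_foldl {δ : Type} (a n : Nat) (f : δ → Int → δ) (d : δ) :
    (PySem.List.pyRange (a : Int) (n : Int) 1).foldl f d =
      (List.range' a (n - a)).foldl (fun d (i : Nat) => f d (i : Int)) d := by
  rw [PySem.List.pyRange_one]
  have h : ((n : Int) - (a : Int)).toNat = n - a := by omega
  rw [h, List.range'_eq_map_range]
  rw [List.foldl_map, List.foldl_map]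
  apply PySem.List.foldl_congr_mem
  intro acc k _
  congr 1

theorem pv_flatMap_singleton {α β : Type} (l : List α) (f : α → β) :
    l.flatMap (fun j => [f j]) = l.map f := by
  induction l with
  | nil => rfl
  | cons a l ih => simp [List.flatMap_cons, ih]

-- per-column: A's inline triple = one counting fold over pvMasked col 0 2
theorem pv_col_eq (d : PySem.Dict (List String) Int) (t : List String) :
    ((PySem.List.pyRange 0 (t.length : Int) 1).foldl (fun d i =>
      let col_list1 := PySem.List.pySetD t i "*"
      let d :=
        if d.contains col_list1 then d.insert col_list1 (d.getD col_list1 0 + 1)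
        else d.insert col_list1 1
      (PySem.List.pyRange (i + 1) (t.length : Int) 1).foldl (fun d j =>
        let col_list2 := PySem.List.pySetD col_list1 j "*"
        if d.contains col_list2 then d.insert col_list2 (d.getD col_list2 0 + 1)
        else d.insert col_list2 1) d)
      (if d.contains t then d.insert t (d.getD t 0 + 1) else d.insert t 1)) =
    (pvMasked t 0 2).foldl (fun d s => d.insert s (d.getD s 0 + 1)) d := by
  rw [pv_bump_eq]
  rw [pvMasked_succ]
  simp only [List.foldl_cons]
  have h0 : (PySem.List.pyRange 0 ((t.length : Nat) : Int) 1) =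
      PySem.List.pyRange ((0 : Nat) : Int) ((t.length : Nat) : Int) 1 := by norm_num
  rw [h0, pv_pyRange_foldl]
  rw [← pv_foldl_foldl_eq_flatMap]
  simp only [Nat.sub_zero]
  apply PySem.List.foldl_congr_mem
  intro d' i hi
  have hit : i < t.length := by
    have := List.mem_range'_1.mp hi
    omega
  rw [pv_set_eq t i hit, pv_bump_eq]
  rw [pvMasked_succ]
  simp only [List.foldl_cons]
  have hlen : (t.take i ++ "*" :: t.drop (i + 1)).length = t.length := pv_mask_length t i hit
  have h1 : ((i : Int) + 1) = (((i + 1 : Nat)) : Int) := by push_cast; ring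
  rw [h1, pv_pyRange_foldl]
  rw [hlen]
  have hsing : (List.range' (i + 1) (t.length - (i + 1))).flatMap
      (fun j => pvMasked ((t.take i ++ "*" :: t.drop (i + 1)).take j ++
        "*" :: (t.take i ++ "*" :: t.drop (i + 1)).drop (j + 1)) (j + 1) 0) =
      (List.range' (i + 1) (t.length - (i + 1))).map
      (fun j => (t.take i ++ "*" :: t.drop (i + 1)).take j ++
        "*" :: (t.take i ++ "*" :: t.drop (i + 1)).drop (j + 1)) := by
    simp only [pvMasked]
    exact pv_flatMap_singleton _ _
  rw [hsing, List.foldl_map]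
  apply PySem.List.foldl_congr_mem
  intro d'' j hj
  have hjt : j < t.length := by
    have := List.mem_range'_1.mp hj
    omega
  rw [pv_set_eq _ j (by rw [hlen]; exact hjt), pv_bump_eq]

-- ===== VERDICT (by name: the statement is the Claim_ definition above) =====
theorem create_masked_shingles_spec : Claim_equal_create_masked_shingles := by
  intro l _
  unfold Spec_create_masked_shingles create_masked_shingles create_masked_shingles_alt
  congr 1
  apply PySem.List.foldl_congr_mem
  intro d col _
  simp only
  exact pv_col_eq d col.2
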